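-- pv_equiv track=rewrite | github.com/liampertile/LP-Project | AFD'S.py | afd_sino
-- ===== SOURCE A (Python) =====
-- ESTADO_ACEPTADO = "ESTADO ACEPTADO"
--
-- ESTADO_NO_ACEPTADO = "ESTADO NO ACEPTADO"
--
-- ESTADO_TRAMPA = "ESTADO TRAMPA"
--
-- def afd_sino(lexema):
--     estado_actual = 0
--     estados_aceptados = [4]
--
--     for caracter in lexema:
--         if estado_actual == 0 and caracter == 's':
--             estado_actual = 1
--         elif estado_actual == 1 and caracter == 'i':
--             estado_actual = 2
--         elif estado_actual == 2 and caracter == 'n':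
--             estado_actual = 3
--         elif estado_actual == 3 and caracter == 'o':
--             estado_actual = 4
--         else:
--             estado_actual = -1
--             return ESTADO_TRAMPA
--
--     if estado_actual in estados_aceptados:
--         return ESTADO_ACEPTADO
--     else:
--         return ESTADO_NO_ACEPTADO
-- ===== SOURCE B (Python) =====
-- ESTADO_ACEPTADO = "ESTADO ACEPTADO"
-- ESTADO_NO_ACEPTADO = "ESTADO NO ACEPTADO"
-- ESTADO_TRAMPA = "ESTADO TRAMPA"
--
-- def afd_sino(lexema):
--     if lexema == "sino":
--         return ESTADO_ACEPTADO
--     if "sino".startswith(lexema):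
--         return ESTADO_NO_ACEPTADO
--     return ESTADO_TRAMPA
-- ===== Notes on version B (the rewrite author's own statement) =====
-- stated objective: simpler
-- what changed: Replaces the character-by-character DFA state loop with a closed-form comparison against the fixed target keyword: equality gives ACEPTADO, a proper prefix gives NO ACEPTADO, anything else TRAMPA.
import Mathlib
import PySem

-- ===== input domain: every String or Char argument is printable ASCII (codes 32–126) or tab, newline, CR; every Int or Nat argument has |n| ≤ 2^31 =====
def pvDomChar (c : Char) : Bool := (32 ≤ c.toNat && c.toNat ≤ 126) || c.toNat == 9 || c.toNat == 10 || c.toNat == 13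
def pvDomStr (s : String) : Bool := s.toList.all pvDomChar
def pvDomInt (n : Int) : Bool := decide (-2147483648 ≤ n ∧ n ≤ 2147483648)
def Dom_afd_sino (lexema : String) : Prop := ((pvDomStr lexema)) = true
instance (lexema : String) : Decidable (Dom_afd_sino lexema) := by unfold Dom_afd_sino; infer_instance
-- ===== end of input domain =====

-- B replaces A's per-character DFA state loop with a closed-form comparison against the
-- fixed target "sino" (equality / proper prefix / otherwise); objective: simpler.

-- ===== PORT A =====
-- the loop with early return: state is estado_actual; returning TRAMPA aborts the loop
def afd_sino_loop : Int → List Char → String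
  | estado, [] => if estado = 4 then "ESTADO ACEPTADO" else "ESTADO NO ACEPTADO"
  | estado, c :: rest =>
    if estado = 0 ∧ c = 's' then afd_sino_loop 1 rest
    else if estado = 1 ∧ c = 'i' then afd_sino_loop 2 rest
    else if estado = 2 ∧ c = 'n' then afd_sino_loop 3 rest
    else if estado = 3 ∧ c = 'o' then afd_sino_loop 4 rest
    else "ESTADO TRAMPA"

def afd_sino (lexema : String) : String :=
  afd_sino_loop 0 lexema.toList

-- ===== PORT B =====
def afd_sino_alt (lexema : String) : String :=
  if lexema = "sino" then "ESTADO ACEPTADO"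
  else if PySem.Str.startswith "sino" lexema then "ESTADO NO ACEPTADO"
  else "ESTADO TRAMPA"

-- ===== PRECONDITION & SPEC =====
def Spec_afd_sino (lexema : String) (out : String) : Prop := out = afd_sino_alt lexema
instance (lexema : String) (out : String) : Decidable (Spec_afd_sino lexema out) := by unfold Spec_afd_sino; infer_instance

-- ===== CLAIM (what is proved, stated in full; the proofs are below) =====
def Claim_equal_afd_sino : Prop := ∀ (lexema : String), Dom_afd_sino lexema → Spec_afd_sino lexema (afd_sino lexema)

-- ===== LEMMAS AND PROOFS =====

theorem loop4 (l : List Char) :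
    afd_sino_loop 4 l = if l = [] then "ESTADO ACEPTADO" else "ESTADO TRAMPA" := by
  cases l with
  | nil => simp [afd_sino_loop]
  | cons c r => simp [afd_sino_loop]

theorem loop3 (l : List Char) :
    afd_sino_loop 3 l =
      if l = ['o'] then "ESTADO ACEPTADO"
      else if l = [] then "ESTADO NO ACEPTADO" else "ESTADO TRAMPA" := by
  cases l with
  | nil => simp [afd_sino_loop]
  | cons c r =>
    by_cases hc : c = 'o'
    · subst hc; simp [afd_sino_loop, loop4]
    · simp [afd_sino_loop, hc]

theorem loop2 (l : List Char) :
    afd_sino_loop 2 l =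
      if l = ['n', 'o'] then "ESTADO ACEPTADO"
      else if l = [] ∨ l = ['n'] then "ESTADO NO ACEPTADO" else "ESTADO TRAMPA" := by
  cases l with
  | nil => simp [afd_sino_loop]
  | cons c r =>
    by_cases hc : c = 'n'
    · subst hc; simp [afd_sino_loop, loop3]
    · simp [afd_sino_loop, hc]

theorem loop1 (l : List Char) :
    afd_sino_loop 1 l =
      if l = ['i', 'n', 'o'] then "ESTADO ACEPTADO"
      else if l = [] ∨ l = ['i'] ∨ l = ['i', 'n'] then "ESTADO NO ACEPTADO"
      else "ESTADO TRAMPA" := by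
  cases l with
  | nil => simp [afd_sino_loop]
  | cons c r =>
    by_cases hc : c = 'i'
    · subst hc; simp [afd_sino_loop, loop2]
    · simp [afd_sino_loop, hc]

theorem loop0 (l : List Char) :
    afd_sino_loop 0 l =
      if l = ['s', 'i', 'n', 'o'] then "ESTADO ACEPTADO"
      else if l = [] ∨ l = ['s'] ∨ l = ['s', 'i'] ∨ l = ['s', 'i', 'n'] then "ESTADO NO ACEPTADO"
      else "ESTADO TRAMPA" := by
  cases l with
  | nil => simp [afd_sino_loop]
  | cons c r =>
    by_cases hc : c = 's'
    · subst hc; simp [afd_sino_loop, loop1]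
    · simp [afd_sino_loop, hc]

theorem prefix_sino_iff (l : List Char) :
    l <+: ['s', 'i', 'n', 'o'] ↔
      l = [] ∨ l = ['s'] ∨ l = ['s', 'i'] ∨ l = ['s', 'i', 'n'] ∨ l = ['s', 'i', 'n', 'o'] := by
  constructor
  · rintro ⟨t, ht⟩
    match l, t, ht with
    | [], _, _ => left; rfl
    | [a], t, ht => simp_all
    | [a, b], t, ht => simp_all
    | [a, b, c], t, ht => simp_all
    | [a, b, c, d], t, ht => simp_all
    | a :: b :: c :: d :: e :: r, t, ht => simp at ht
  · rintro (h | h | h | h | h) <;> subst h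
    · exact ⟨['s','i','n','o'], rfl⟩
    · exact ⟨['i','n','o'], rfl⟩
    · exact ⟨['n','o'], rfl⟩
    · exact ⟨['o'], rfl⟩
    · exact ⟨[], rfl⟩

-- ===== VERDICT (by name: the statement is the Claim_ definition above) =====
theorem afd_sino_spec : Claim_equal_afd_sino := by
  intro lexema _
  unfold Spec_afd_sino afd_sino afd_sino_alt
  rw [loop0]
  have heq : (lexema = "sino") ↔ lexema.toList = ['s', 'i', 'n', 'o'] := by
    constructor
    · intro h; subst h; rfl
    · intro h
      have h2 : lexema.toList = "sino".toList := h
      exact String.toList_inj.mp h2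
  by_cases h4 : lexema.toList = ['s', 'i', 'n', 'o']
  · simp [heq.mpr h4]
  · rw [if_neg h4, if_neg (fun h => h4 (heq.mp h))]
    by_cases hp : lexema.toList = [] ∨ lexema.toList = ['s'] ∨ lexema.toList = ['s', 'i'] ∨ lexema.toList = ['s', 'i', 'n']
    · rw [if_pos hp]
      have hb : PySem.Chars.startswith ['s','i','n','o'] lexema.toList = true := by
        rw [PySem.Chars.startswith_iff]
        exact (prefix_sino_iff _).mpr (by tauto)
      simp [PySem.Str.startswith_eq, hb]
    · rw [if_neg hp]
      have hb : PySem.Chars.startswith ['s','i','n','o'] lexema.toList = false := by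
        rw [Bool.eq_false_iff]
        intro hc
        have := (prefix_sino_iff _).mp ((PySem.Chars.startswith_iff _ _).mp hc)
        tauto
      simp [PySem.Str.startswith_eq, hb]
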